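-- pv_equiv track=rewrite | github.com/LogicOber/dify-e2b-custom-tool | tools/e2b_sandbox.py | _preprocess_matplotlib_code
-- ===== SOURCE A (Python) =====
-- def _preprocess_matplotlib_code(code: str) -> str:
--     """Preprocess code containing matplotlib, ensuring images are displayed"""
--     if 'plt.savefig' in code and 'plt.show()' not in code:
--         # Split code lines
--         lines = code.split('\n')
--         processed_lines = []
--
--         for line in lines:
--             processed_lines.append(line)
--             # Add show after each savefig
--             if 'plt.savefig' in line and not line.strip().startswith('#'):
--                 # Keep the same indentation as the original code
--                 indent = len(line) - len(line.lstrip())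
--                 processed_lines.append(' ' * indent + 'plt.show()')
--
--         return '\n'.join(processed_lines)
--     return code
-- ===== SOURCE B (Python) =====
-- import re
--
-- _SAVEFIG_LINE = re.compile(r'^(?!\s*#).*plt\.savefig.*$', re.MULTILINE)
--
--
-- def _add_show(m: "re.Match") -> str:
--     line = m.group(0)
--     indent = len(line) - len(line.lstrip())
--     return line + '\n' + ' ' * indent + 'plt.show()'
--
--
-- def _preprocess_matplotlib_code(code: str) -> str:
--     """Preprocess code containing matplotlib, ensuring images are displayed"""
--     if 'plt.savefig' not in code or 'plt.show()' in code:
--         return code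
--     return _SAVEFIG_LINE.sub(_add_show, code)
-- ===== Notes on version B (the rewrite author's own statement) =====
-- stated objective: idiomatic
-- what changed: Replaced A's split-into-lines / per-line accumulator / join pipeline by a single precompiled re.sub with a MULTILINE pattern matching whole non-comment lines containing plt.savefig, and a callback that appends an equally indented plt.show() to each match.
import Mathlib
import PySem

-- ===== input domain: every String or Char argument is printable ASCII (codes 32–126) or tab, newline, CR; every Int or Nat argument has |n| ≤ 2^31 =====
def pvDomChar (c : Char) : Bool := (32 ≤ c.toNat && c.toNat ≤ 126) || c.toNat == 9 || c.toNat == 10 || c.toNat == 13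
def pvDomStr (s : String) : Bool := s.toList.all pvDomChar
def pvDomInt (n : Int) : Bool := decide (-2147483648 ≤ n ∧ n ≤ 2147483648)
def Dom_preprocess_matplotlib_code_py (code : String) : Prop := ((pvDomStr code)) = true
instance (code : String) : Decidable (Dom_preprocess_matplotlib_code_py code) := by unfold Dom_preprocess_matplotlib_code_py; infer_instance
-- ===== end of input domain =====

-- B replaces A's split('\n')/accumulate/join pipeline by one re.sub with a MULTILINE
-- pattern matching whole non-comment savefig lines; objective: idiomatic.

-- ===== PORT A =====
-- literal port of A: split on '\n', foldl accumulating processed lines, join with '\n';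
-- ' ' * indent is List.replicate (exact), code.split('\n') is split? with the nonempty
-- separator ['\n'] (always some, so .getD [] is never the default)
def preprocess_matplotlib_code_py (code : String) : String :=
  if PySem.Str.isIn "plt.savefig" code && !(PySem.Str.isIn "plt.show()" code) then
    let lines := (PySem.Chars.split? code.toList ['\n']).getD []
    let processed := lines.foldl (fun acc line =>
      let acc1 := acc ++ [line]
      if PySem.Chars.isIn "plt.savefig".toList line
          && !(PySem.Chars.startswith (PySem.Chars.strip line) ['#']) then
        acc1 ++ [List.replicate (line.length - (PySem.Chars.lstrip line).length) ' '
                  ++ "plt.show()".toList]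
      else acc1) []
    String.ofList (PySem.Chars.join ['\n'] processed)
  else code

-- ===== PORT B =====
-- hand port of Source B's _SAVEFIG_LINE.sub(_add_show, code): the pattern
-- r'^(?!\s*#).*plt\.savefig.*$' with re.MULTILINE is anchored by ^…$, and with
-- MULTILINE '^' matches only at the string start or just after a '\n' while '.'
-- never matches '\n', so sub's scan attempts and matches exactly whole
-- '\n'-delimited lines (takeWhile (≠ '\n') at each line start is exact here);
-- a line matches iff it contains 'plt.savefig' (isIn) and the negative lookahead
-- (?!\s*#) holds, i.e. its whitespace-lstrip does not start with '#' (\s = Python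
-- str.isspace on the ASCII domain); pvAddShow is the _add_show callback verbatim.
def pvAddShow (line : List Char) : List Char :=
  line ++ '\n' ::
    (List.replicate (line.length - (PySem.Chars.lstrip line).length) ' '
      ++ "plt.show()".toList)

def pvReSubLines (rest : List Char) : List Char :=
  let line := rest.takeWhile (fun c => !(c == '\n'))
  let emit :=
    if PySem.Chars.isIn "plt.savefig".toList line
        && !(PySem.Chars.startswith (PySem.Chars.lstrip line) ['#']) then
      pvAddShow line
    else line
  match h : rest.drop line.length with
  | [] => emit
  | _ :: t => emit ++ '\n' :: pvReSubLines t
termination_by rest.length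
decreasing_by
  have hlen := congrArg List.length h
  simp only [List.length_drop, List.length_cons] at hlen
  omega

def preprocess_matplotlib_code_py_alt (code : String) : String :=
  if !(PySem.Str.isIn "plt.savefig" code) || PySem.Str.isIn "plt.show()" code then code
  else String.ofList (pvReSubLines code.toList)

-- ===== PRECONDITION & SPEC =====
def Spec_preprocess_matplotlib_code_py (code : String) (out : String) : Prop := out = preprocess_matplotlib_code_py_alt code
instance (code : String) (out : String) : Decidable (Spec_preprocess_matplotlib_code_py code out) := by unfold Spec_preprocess_matplotlib_code_py; infer_instance

-- ===== CLAIM (what is proved, stated in full; the proofs are below) =====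
def Claim_equal_preprocess_matplotlib_code_py : Prop := ∀ (code : String), Dom_preprocess_matplotlib_code_py code → Spec_preprocess_matplotlib_code_py code (preprocess_matplotlib_code_py code)

-- ===== LEMMAS AND PROOFS =====

-- reference splitter: split a char list at every '\n'
def pvNsplit : List Char → List (List Char)
  | [] => [[]]
  | c :: rest =>
    if c = '\n' then [] :: pvNsplit rest
    else
      match pvNsplit rest with
      | [] => [[c]]
      | p :: ps => (c :: p) :: ps

theorem pvNsplit_ne_nil (l : List Char) : pvNsplit l ≠ [] := by
  cases l with
  | nil => simp [pvNsplit]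
  | cons c rest => simp only [pvNsplit]; split; · simp
                   · split <;> simp_all

theorem pvNsplit_no_newline (l : List Char) (h : '\n' ∉ l) : pvNsplit l = [l] := by
  induction l with
  | nil => rfl
  | cons c rest ih =>
    simp only [List.mem_cons, not_or] at h
    simp [pvNsplit, Ne.symm h.1, ih h.2]

theorem pvNsplit_append (line t : List Char) (h : '\n' ∉ line) :
    pvNsplit (line ++ '\n' :: t) = line :: pvNsplit t := by
  induction line with
  | nil => simp [pvNsplit]
  | cons c rest ih =>
    simp only [List.mem_cons, not_or] at h
    simp [pvNsplit, Ne.symm h.1, ih h.2]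

-- PySem's splitOn on separator ['\n'] is pvNsplit
theorem pv_go (l : List Char) (fuel : Nat) (h : l.length ≤ fuel) (cur : List Char)
    (acc : List (List Char)) :
    PySem.Chars.splitOn.go ['\n'] (fuel + 1) l cur acc
      = acc.reverse ++ (match pvNsplit l with
          | [] => []
          | p :: ps => (cur.reverse ++ p) :: ps) := by
  induction l generalizing fuel cur acc with
  | nil => simp [PySem.Chars.splitOn.go, pvNsplit]
  | cons c rest ih =>
    simp only [List.length_cons] at h
    obtain ⟨f, rfl⟩ : ∃ f, fuel = f + 1 := ⟨fuel - 1, by omega⟩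
    rw [PySem.Chars.splitOn.go]
    by_cases hc : c = '\n'
    · subst hc
      simp only [List.isPrefixOf, Bool.and_true, beq_self_eq_true, if_pos, List.length_cons,
        List.length_nil, List.drop_succ_cons, List.drop_zero]
      rw [ih f (by omega)]
      obtain ⟨p, ps, hps⟩ : ∃ p ps, pvNsplit rest = p :: ps := by
        rcases hh : pvNsplit rest with _ | ⟨p, ps⟩
        · exact absurd hh (pvNsplit_ne_nil rest)
        · exact ⟨p, ps, rfl⟩
      simp [pvNsplit, hps]
    · have hpre : ['\n'].isPrefixOf (c :: rest) = false := by
        simp [List.isPrefixOf]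
        exact fun hh => (hc hh.symm).elim
      simp only [hpre, Bool.false_eq_true, if_false]
      rw [ih f (by omega)]
      obtain ⟨p, ps, hps⟩ : ∃ p ps, pvNsplit rest = p :: ps := by
        rcases hh : pvNsplit rest with _ | ⟨p, ps⟩
        · exact absurd hh (pvNsplit_ne_nil rest)
        · exact ⟨p, ps, rfl⟩
      simp [pvNsplit, hc, hps]

theorem pv_splitOn_eq (cs : List Char) : PySem.Chars.splitOn cs ['\n'] = pvNsplit cs := by
  unfold PySem.Chars.splitOn
  rw [pv_go cs cs.length (le_refl _) [] []]
  obtain ⟨p, ps, hps⟩ : ∃ p ps, pvNsplit cs = p :: ps := by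
    rcases hh : pvNsplit cs with _ | ⟨p, ps⟩
    · exact absurd hh (pvNsplit_ne_nil cs)
    · exact ⟨p, ps, rfl⟩
  simp [hps]

-- A's comment test uses strip(), B's lookahead sees only the left end (lstrip);
-- startswith '#' cannot distinguish them
theorem pv_strip_hash (l : List Char) :
    PySem.Chars.startswith (PySem.Chars.strip l) ['#']
      = PySem.Chars.startswith (PySem.Chars.lstrip l) ['#'] := by
  unfold PySem.Chars.strip
  rcases hl : PySem.Chars.lstrip l with _ | ⟨c, r⟩
  · simp [PySem.Chars.rstrip]
  · unfold PySem.Chars.rstrip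
    simp only [List.reverse_cons]
    rw [List.dropWhile_append]
    have hc : PySem.Chars.isspace c = false := by
      have : l.dropWhile PySem.Chars.isspace = c :: r := hl
      have h2 := List.head_dropWhile_not PySem.Chars.isspace (l := l) (by simp [this])
      simpa [this] using h2
    split
    · simp [hc, PySem.Chars.startswith, List.isPrefixOf]
    · simp [PySem.Chars.startswith, List.isPrefixOf]

-- the per-line condition and inserted line (shared shape of both ports after pv_strip_hash)
def pvCond (line : List Char) : Bool :=
  PySem.Chars.isIn "plt.savefig".toList line
    && !(PySem.Chars.startswith (PySem.Chars.lstrip line) ['#'])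

def pvShow (line : List Char) : List Char :=
  List.replicate (line.length - (PySem.Chars.lstrip line).length) ' ' ++ "plt.show()".toList

def pvPiece (line : List Char) : List (List Char) :=
  line :: (if pvCond line then [pvShow line] else [])

-- A's foldl builds exactly the flatMap of pvPiece
theorem pv_foldl_eq (lines : List (List Char)) :
    lines.foldl (fun acc line =>
      let acc1 := acc ++ [line]
      if PySem.Chars.isIn "plt.savefig".toList line
          && !(PySem.Chars.startswith (PySem.Chars.strip line) ['#']) then
        acc1 ++ [List.replicate (line.length - (PySem.Chars.lstrip line).length) ' '
                  ++ "plt.show()".toList]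
      else acc1) []
      = lines.flatMap pvPiece := by
  have hf : (fun (acc : List (List Char)) line =>
      let acc1 := acc ++ [line]
      if PySem.Chars.isIn "plt.savefig".toList line
          && !(PySem.Chars.startswith (PySem.Chars.strip line) ['#']) then
        acc1 ++ [List.replicate (line.length - (PySem.Chars.lstrip line).length) ' '
                  ++ "plt.show()".toList]
      else acc1)
      = (fun acc line => acc ++ pvPiece line) := by
    funext acc line
    simp only [pvPiece, pvCond, pvShow, pv_strip_hash]
    split <;> simp
  rw [hf, PySem.List.foldl_append_eq_flatMap]
  simp

theorem pv_drop_takeWhile (p : Char → Bool) (l : List Char) :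
    l.drop (l.takeWhile p).length = l.dropWhile p := by
  induction l with
  | nil => simp
  | cons c t ih => by_cases h : p c <;> simp [h, ih]

theorem pv_join_cons (a : List Char) (l : List (List Char)) (hl : l ≠ []) :
    PySem.Chars.join ['\n'] (a :: l) = a ++ '\n' :: PySem.Chars.join ['\n'] l := by
  cases l with
  | nil => simp at hl
  | cons b bs => rw [PySem.Chars.join_cons_cons]; simp

theorem pv_join_piece_nil (line : List Char) :
    PySem.Chars.join ['\n'] (pvPiece line)
      = if pvCond line then line ++ '\n' :: pvShow line else line := by
  unfold pvPiece
  split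
  · rw [pv_join_cons _ _ (by simp), PySem.Chars.join_singleton]
  · rw [PySem.Chars.join_singleton]

theorem pv_join_piece (line : List Char) (X : List (List Char)) (hX : X ≠ []) :
    PySem.Chars.join ['\n'] (pvPiece line ++ X)
      = (if pvCond line then line ++ '\n' :: pvShow line else line)
          ++ '\n' :: PySem.Chars.join ['\n'] X := by
  unfold pvPiece
  split
  · rw [List.cons_append, List.cons_append, List.nil_append,
      pv_join_cons _ _ (by simp), pv_join_cons _ _ hX]
    simp
  · rw [List.cons_append, List.nil_append, pv_join_cons _ _ hX]

-- B's regex sub computes join '\n' of the flatMap over the reference split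
theorem pv_resub_eq (rest : List Char) :
    pvReSubLines rest = PySem.Chars.join ['\n'] ((pvNsplit rest).flatMap pvPiece) := by
  induction rest using pvReSubLines.induct with
  | case1 x _line h =>
    have hdw : x.dropWhile (fun c => !(c == '\n')) = [] := by
      rw [← pv_drop_takeWhile]; exact h
    have hall : ∀ c ∈ x, c ≠ '\n' := by
      intro c hc hcn
      have := (List.dropWhile_eq_nil_iff.mp hdw) c hc
      simp [hcn] at this
    have hline : x.takeWhile (fun c => !(c == '\n')) = x :=
      List.takeWhile_eq_self_iff.mpr (fun c hc => by simpa using hall c hc)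
    have hnl : '\n' ∉ x := fun hm => hall '\n' hm rfl
    rw [pvReSubLines, pvNsplit_no_newline x hnl]
    simp only [List.flatMap_cons, List.flatMap_nil, List.append_nil]
    rw [pv_join_piece_nil]
    split
    · next heq =>
      simp only [hline, pvCond, pvShow, pvAddShow]
    · next heq =>
      rw [hline, List.drop_length] at heq
      cases heq
  | case2 x _line c t h ih =>
    have hdw : x.dropWhile (fun cc => !(cc == '\n')) = c :: t := by
      rw [← pv_drop_takeWhile]; exact h
    have hc : c = '\n' := by
      have h2 := List.head_dropWhile_not (fun cc => !(cc == '\n')) (l := x) (by simp [hdw])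
      simpa [hdw] using h2
    subst hc
    have hx : x.takeWhile (fun cc => !(cc == '\n')) ++ '\n' :: t = x := by
      rw [← hdw]; exact List.takeWhile_append_dropWhile
    have hnl : '\n' ∉ x.takeWhile (fun cc => !(cc == '\n')) := by
      intro hm
      have := List.mem_takeWhile_imp hm
      simp at this
    have hsplitx : pvNsplit x = x.takeWhile (fun cc => !(cc == '\n')) :: pvNsplit t := by
      rw [← pvNsplit_append _ t hnl, hx]
    obtain ⟨p, ps, hps⟩ : ∃ p ps, pvNsplit t = p :: ps := by
      rcases hh : pvNsplit t with _ | ⟨p, ps⟩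
      · exact absurd hh (pvNsplit_ne_nil t)
      · exact ⟨p, ps, rfl⟩
    rw [pvReSubLines, hsplitx, List.flatMap_cons]
    rw [pv_join_piece _ _ (by rw [hps]; simp [List.flatMap_cons, pvPiece])]
    split
    · next heq =>
      rw [h] at heq
      cases heq
    · next head t' heq =>
      rw [h] at heq
      injection heq with e1 e2
      subst e1; subst e2
      rw [ih]
      simp only [pvCond, pvShow, pvAddShow]

-- ===== VERDICT (by name: the statement is the Claim_ definition above) =====
theorem preprocess_matplotlib_code_py_spec : Claim_equal_preprocess_matplotlib_code_py := by
  intro code _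
  unfold Spec_preprocess_matplotlib_code_py preprocess_matplotlib_code_py
    preprocess_matplotlib_code_py_alt
  have hsplit : PySem.Chars.split? code.toList ['\n'] = some (pvNsplit code.toList) := by
    rw [← pv_splitOn_eq]; simp [PySem.Chars.split?]
  cases h1 : PySem.Str.isIn "plt.savefig" code <;> cases h2 : PySem.Str.isIn "plt.show()" code
  · simp
  · simp
  · simp only [Bool.not_false, Bool.and_true, Bool.not_true, Bool.or_false, reduceIte,
      Bool.false_eq_true]
    rw [hsplit]
    simp only [Option.getD_some]
    rw [pv_foldl_eq, pv_resub_eq]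
  · simp
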